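-- pv_equiv track=rewrite | github.com/jordans1882/pyFEA | tests/fea_bayes_hypertuning.py | linear_factorizer
-- ===== SOURCE A (Python) =====
-- def linear_factorizer(fact_size, overlap, dim):
--     smallest = 0
--     if fact_size <= overlap:
--         temp = fact_size
--         fact_size = overlap
--         overlap = temp
--     largest = fact_size
--     factors = []
--     while largest <= dim:
--         factors.append([x for x in range(smallest, largest)])
--         smallest = largest - overlap
--         largest += fact_size - overlap
--     factors.append([x for x in range(smallest, dim)])
--     return factors
-- ===== SOURCE B (Python) =====
-- def linear_factorizer(fact_size, overlap, dim):
--     # Normalise so fs is the larger value (mirrors A's swap), then derive each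
--     # window directly from its index k instead of carrying running pointers.
--     fs, ov = (overlap, fact_size) if fact_size <= overlap else (fact_size, overlap)
--     step = fs - ov
--     n = (dim - fs) // step + 1 if fs <= dim else 0
--     factors = [list(range(k * step, k * step + fs)) for k in range(n)]
--     factors.append(list(range(n * step, dim)))
--     return factors
-- ===== Notes on version B (the rewrite author's own statement) =====
-- stated objective: simpler
-- what changed: B replaces A's while loop with two mutating pointers (smallest/largest) by computing the window count n in closed form from step = fact_size - overlap and emitting each window [k*step, k*step+fact_size) directly from its index k via a comprehension, plus the final partial window.
import Mathlib
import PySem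

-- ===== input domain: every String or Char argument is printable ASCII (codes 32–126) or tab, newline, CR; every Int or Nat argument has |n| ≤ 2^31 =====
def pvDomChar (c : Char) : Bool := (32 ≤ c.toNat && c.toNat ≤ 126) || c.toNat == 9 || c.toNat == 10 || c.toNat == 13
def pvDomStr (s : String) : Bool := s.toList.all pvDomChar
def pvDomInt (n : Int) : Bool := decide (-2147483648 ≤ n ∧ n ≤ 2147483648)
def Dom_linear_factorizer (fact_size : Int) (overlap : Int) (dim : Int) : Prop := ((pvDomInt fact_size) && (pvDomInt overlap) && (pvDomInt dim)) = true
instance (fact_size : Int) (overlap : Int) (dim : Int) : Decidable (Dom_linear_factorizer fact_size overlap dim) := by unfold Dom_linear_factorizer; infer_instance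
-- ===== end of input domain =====

-- B derives each window directly from its index k with a closed-form window count,
-- instead of A's while loop over two running pointers (objective: simpler).

-- ===== PORT A =====
-- A's while loop; the extra '0 < fs - ov' conjunct in the guard only makes the
-- recursion total: it differs from the Python only where the Python loops forever
-- (fs = ov and largest ≤ dim), inputs excluded by Pre_.
def laLoop (fs ov dim smallest largest : Int) (factors : List (List Int)) : List (List Int) :=
  if _h : largest ≤ dim ∧ 0 < fs - ov then
    laLoop fs ov dim (largest - ov) (largest + (fs - ov))
      (factors ++ [PySem.List.pyRange smallest largest 1])
  else
    factors ++ [PySem.List.pyRange smallest dim 1]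
termination_by (dim + 1 - largest).toNat
decreasing_by omega

def linear_factorizer (fact_size : Int) (overlap : Int) (dim : Int) : List (List Int) :=
  let p := if fact_size ≤ overlap then (overlap, fact_size) else (fact_size, overlap)
  laLoop p.1 p.2 dim 0 p.1 []

-- ===== PORT B =====
def linear_factorizer_alt (fact_size : Int) (overlap : Int) (dim : Int) : List (List Int) :=
  let p := if fact_size ≤ overlap then (overlap, fact_size) else (fact_size, overlap)
  let step := p.1 - p.2
  let n : Int := if p.1 ≤ dim then PySem.Int.floordiv (dim - p.1) step + 1 else 0
  ((PySem.List.pyRange 0 n 1).map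
      (fun k => PySem.List.pyRange (k * step) (k * step + p.1) 1))
    ++ [PySem.List.pyRange (n * step) dim 1]

-- ===== PRECONDITION & SPEC =====
-- Pre_ excludes exactly the inputs (fact_size = overlap and fact_size ≤ dim) on which
-- A's while loop has step 0 and never terminates (B raises ZeroDivisionError there).
def Pre_linear_factorizer (fact_size : Int) (overlap : Int) (dim : Int) : Prop :=
  ¬ (fact_size = overlap ∧ fact_size ≤ dim)
instance (fact_size : Int) (overlap : Int) (dim : Int) : Decidable (Pre_linear_factorizer fact_size overlap dim) := by unfold Pre_linear_factorizer; infer_instance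

def pvWitness_linear_factorizer : Int × Int × Int := (3, 1, 10)

def Spec_linear_factorizer (fact_size : Int) (overlap : Int) (dim : Int) (out : List (List Int)) : Prop := out = linear_factorizer_alt fact_size overlap dim
instance (fact_size : Int) (overlap : Int) (dim : Int) (out : List (List Int)) : Decidable (Spec_linear_factorizer fact_size overlap dim out) := by unfold Spec_linear_factorizer; infer_instance

-- ===== CLAIM (what is proved, stated in full; the proofs are below) =====
def Claim_equal_linear_factorizer : Prop := ∀ (fact_size : Int) (overlap : Int) (dim : Int), Dom_linear_factorizer fact_size overlap dim → Pre_linear_factorizer fact_size overlap dim → Spec_linear_factorizer fact_size overlap dim (linear_factorizer fact_size overlap dim)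

-- ===== LEMMAS AND PROOFS =====

-- Loop invariant: after k iterations the pointers are (k*step, fs + k*step), and the
-- remaining run of the loop produces exactly the windows for indices k, …, n-1 plus
-- the final partial window.
lemma laLoop_spec (fs ov dim step n : Int) (hstep : step = fs - ov) (hpos : 0 < step)
    (hn : n = if fs ≤ dim then PySem.Int.floordiv (dim - fs) step + 1 else 0) :
    ∀ (m : Nat) (k : Int) (acc : List (List Int)) (smallest largest : Int),
      0 ≤ k → k ≤ n → smallest = k * step → largest = fs + k * step → m = (n - k).toNat →
      laLoop fs ov dim smallest largest acc
        = acc ++ ((PySem.List.pyRange k n 1).map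
              (fun j => PySem.List.pyRange (j * step) (j * step + fs) 1))
            ++ [PySem.List.pyRange (n * step) dim 1] := by
  intro m
  induction m with
  | zero =>
    intro k acc smallest largest hk0 hkn hs hl hm
    have hkn' : k = n := by omega
    subst hkn' hs hl
    rw [laLoop]
    have hguard : ¬ (fs + k * step ≤ dim ∧ 0 < fs - ov) := by
      rintro ⟨hle, -⟩
      by_cases hfd : fs ≤ dim
      · rw [if_pos hfd] at hn
        have := (PySem.Int.floordiv_lt_iff_lt_mul (a := dim - fs) (b := step) (q := k) hpos).mp (by omega)
        omega
      · rw [if_neg hfd] at hn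
        have : k * step = 0 := by rw [hn]; ring
        omega
    rw [dif_neg hguard, PySem.List.pyRange_one_eq_nil (le_refl k)]
    simp [mul_comm]
  | succ m ih =>
    intro k acc smallest largest hk0 hkn hs hl hm
    subst hs hl
    have hklt : k < n := by omega
    have hfd : fs ≤ dim := by
      by_contra hfd
      rw [if_neg hfd] at hn
      omega
    rw [if_pos hfd] at hn
    have hle : fs + k * step ≤ dim := by
      have := (PySem.Int.le_floordiv_iff_mul_le (a := dim - fs) (b := step) (q := k) hpos).mp (by omega)
      omega
    rw [laLoop, dif_pos ⟨hle, by omega⟩]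
    rw [ih (k + 1) _ _ _ (by omega) (by omega) (by rw [hstep]; ring) (by rw [hstep]; ring)
        (by omega)]
    rw [PySem.List.pyRange_one_cons hklt]
    simp [add_comm]

-- The whole loop from its initial state, for a positive step.
lemma laLoop_main (fs ov dim : Int) (hpos : 0 < fs - ov) :
    laLoop fs ov dim 0 fs []
      = ((PySem.List.pyRange 0
            (if fs ≤ dim then PySem.Int.floordiv (dim - fs) (fs - ov) + 1 else 0) 1).map
          (fun k => PySem.List.pyRange (k * (fs - ov)) (k * (fs - ov) + fs) 1))
        ++ [PySem.List.pyRange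
              ((if fs ≤ dim then PySem.Int.floordiv (dim - fs) (fs - ov) + 1 else 0) * (fs - ov))
              dim 1] := by
  set step := fs - ov with hstep
  set n := if fs ≤ dim then PySem.Int.floordiv (dim - fs) step + 1 else 0 with hn
  have hn0 : 0 ≤ n := by
    by_cases hfd : fs ≤ dim
    · have := (PySem.Int.le_floordiv_iff_mul_le (a := dim - fs) (b := step) (q := 0) hpos).mpr (by omega)
      rw [hn, if_pos hfd]; omega
    · rw [hn, if_neg hfd]
  have h := laLoop_spec fs ov dim step n hstep hpos hn n.toNat 0 [] 0 fs (le_refl 0) hn0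
    (by ring) (by ring) (by omega)
  simpa using h

-- ===== VERDICT (by name: the statement is the Claim_ definition above) =====
theorem linear_factorizer_spec : Claim_equal_linear_factorizer := by
  intro a b dim _ hpre
  unfold Pre_linear_factorizer at hpre
  unfold Spec_linear_factorizer linear_factorizer linear_factorizer_alt
  by_cases hsw : a ≤ b
  · simp only [if_pos hsw]
    by_cases heq : a = b
    · -- step = 0: Pre_ forces dim < a, the loop body never runs
      subst heq
      have hd : ¬ (a ≤ dim) := fun h => hpre ⟨rfl, h⟩
      rw [laLoop, dif_neg (by omega)]
      simp [if_neg hd, PySem.List.pyRange_one_eq_nil (le_refl (0 : Int))]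
    · exact laLoop_main b a dim (by omega)
  · simp only [if_neg hsw]
    exact laLoop_main a b dim (by omega)
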